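-- pv_equiv track=rewrite | github.com/lacayodaniel/essentials | python-essentials/mathworks.py | freq_of_max_3
-- ===== SOURCE A (Python) =====
-- from collections import Counter
--
-- def freq_of_max_3(carsParked, carQuantity):
-- 	carQ = carQuantity
-- 	carQ.sort(reverse=True)
-- 	dcount = dict(Counter(carsParked[carQ[0] - 1:]))
-- 	record_max = max(dcount.keys())
-- 	record_count = dcount[record_max]
-- 	ans = [record_count]
-- 	for i in range(len(carQ) - 1):
-- 		if carQ[i + 1] == carQ[i]:
-- 			ans.append(ans[-1])
-- 			continue
-- 		curr_max = max(carsParked[carQ[i + 1] - 1:carQ[i] - 1])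
-- 		max_count = carsParked[carQ[i + 1] - 1:carQ[i] - 1].count(curr_max)
-- 		if curr_max > record_max:
-- 			record_max = curr_max
-- 			dcount[curr_max] = max_count
-- 			record_count = max_count
-- 		elif curr_max == record_max:
-- 			dcount[curr_max] += max_count
-- 			record_count = max_count
-- 		ans.append(dcount[record_max])
-- 	return ans
-- ===== SOURCE B (Python) =====
-- def freq_of_max_3(carsParked, carQuantity):
--     # NOTE: like A, this sorts carQuantity in place (descending).
--     carQuantity.sort(reverse=True)
--     ans = []
--     for q in carQuantity:
--         s = carsParked[q - 1:]
--         m = max(s)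
--         ans.append(s.count(m))
--     return ans
-- ===== Notes on version B (the rewrite author's own statement) =====
-- stated objective: simpler
-- what changed: Replaces the incremental record_max/dcount/Counter bookkeeping over segment slices with a direct per-threshold recomputation: for each sorted threshold q, take the suffix carsParked[q-1:], compute its max and append its count.
-- outside the precondition, e.g. on freq_of_max_3([1, 2], []): A raises IndexError, B returns []; on freq_of_max_3([1, 2], [1, 0]): A raises ValueError, B returns [1, 1]; on freq_of_max_3([5], [3]): A raises ValueError, B raises ValueError
import Mathlib
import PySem

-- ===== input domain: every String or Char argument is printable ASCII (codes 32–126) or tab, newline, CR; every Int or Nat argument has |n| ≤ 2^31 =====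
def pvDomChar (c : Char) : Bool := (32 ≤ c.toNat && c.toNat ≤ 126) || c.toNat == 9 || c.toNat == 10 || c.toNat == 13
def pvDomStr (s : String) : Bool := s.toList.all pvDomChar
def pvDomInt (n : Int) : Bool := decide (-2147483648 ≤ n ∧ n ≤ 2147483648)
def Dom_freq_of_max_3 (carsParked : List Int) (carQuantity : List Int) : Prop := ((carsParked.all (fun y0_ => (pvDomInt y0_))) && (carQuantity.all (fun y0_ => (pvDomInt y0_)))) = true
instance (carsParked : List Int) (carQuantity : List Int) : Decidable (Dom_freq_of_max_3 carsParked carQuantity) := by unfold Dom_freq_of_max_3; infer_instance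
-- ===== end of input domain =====

-- B recomputes max and its count directly on each suffix instead of A's incremental
-- record_max/dcount bookkeeping (objective: simpler).  Both A and B sort carQuantity in
-- place in Python; the equivalence proved here is about the RETURN value.

-- ===== PORT A =====
-- the body of A's 'for i in range(len(carQ) - 1)' loop; state = (dcount, record_max, record_count, ans),
-- iterating over the adjacent pairs (carQ[i], carQ[i+1]) of the sorted list
def fomStepA (carsParked : List Int)
    (st : PySem.Dict Int Int × Int × Int × List Int) (p : Int × Int) :
    PySem.Dict Int Int × Int × Int × List Int :=
  let (dcount, record_max, record_count, ans) := st
  let (qa, qb) := p          -- qa = carQ[i], qb = carQ[i+1]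
  if qb = qa then
    (dcount, record_max, record_count, ans ++ [(PySem.List.pyGet? ans (-1)).getD 0])
  else
    let seg := PySem.List.slice carsParked (some (qb - 1)) (some (qa - 1))
    let curr_max := (PySem.List.max? seg (fun x => x)).getD 0   -- none = ValueError, excluded by Pre_
    let max_count : Int := (seg.count curr_max : Int)
    if curr_max > record_max then
      let d' := dcount.insert curr_max max_count
      (d', curr_max, max_count, ans ++ [d'.getD curr_max 0])
    else if curr_max = record_max then
      let d' := dcount.modify curr_max 0 (· + max_count)
      (d', record_max, max_count, ans ++ [d'.getD record_max 0])
    else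
      (dcount, record_max, record_count, ans ++ [dcount.getD record_max 0])

def freq_of_max_3 (carsParked : List Int) (carQuantity : List Int) : List Int :=
  let carQ := PySem.List.sorted carQuantity (fun x => x) true
  match carQ with
  | [] => []                 -- carQ[0] raises IndexError; excluded by Pre_
  | q0 :: _ =>
    let suf := PySem.List.slice carsParked (some (q0 - 1)) none
    let dcount := PySem.Dict.counter suf
    let record_max := (PySem.List.max? dcount.keys (fun x => x)).getD 0  -- none = ValueError, excluded by Pre_
    let record_count := dcount.getD record_max 0
    ((carQ.zip carQ.tail).foldl (fomStepA carsParked)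
        (dcount, record_max, record_count, [record_count])).2.2.2

-- ===== PORT B =====
def freq_of_max_3_alt (carsParked : List Int) (carQuantity : List Int) : List Int :=
  (PySem.List.sorted carQuantity (fun x => x) true).map (fun q =>
    let s := PySem.List.slice carsParked (some (q - 1)) none
    let m := (PySem.List.max? s (fun x => x)).getD 0   -- none = ValueError, excluded by Pre_
    (s.count m : Int))

-- ===== PRECONDITION & SPEC =====
-- Pre_ holds exactly when Python A returns normally: the sorted threshold list is nonempty
-- (else IndexError), the first suffix carsParked[q0-1:] is nonempty, and each later slice
-- carsParked[q_{i+1}-1 : q_i-1] between two distinct consecutive thresholds is nonempty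
-- (an empty slice makes max() raise ValueError).  Stated via Python's slice-index
-- normalisation clampIdx on the sorted list.
def Pre_freq_of_max_3 (carsParked : List Int) (carQuantity : List Int) : Prop :=
  let n := carsParked.length
  let s := PySem.List.sorted carQuantity (fun x => x) true
  s ≠ [] ∧
  (∀ q0 ∈ s.head?, PySem.List.clampIdx n (q0 - 1) < n) ∧
  (∀ p ∈ s.zip s.tail, p.2 = p.1 ∨
      PySem.List.clampIdx n (p.2 - 1) < PySem.List.clampIdx n (p.1 - 1))
instance (carsParked : List Int) (carQuantity : List Int) : Decidable (Pre_freq_of_max_3 carsParked carQuantity) := by unfold Pre_freq_of_max_3; infer_instance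

def pvWitness_freq_of_max_3 : List Int × List Int := ([2, 1, 2, 3], [2, 4, 2, 1])

def Spec_freq_of_max_3 (carsParked : List Int) (carQuantity : List Int) (out : List Int) : Prop := out = freq_of_max_3_alt carsParked carQuantity
instance (carsParked : List Int) (carQuantity : List Int) (out : List Int) : Decidable (Spec_freq_of_max_3 carsParked carQuantity out) := by unfold Spec_freq_of_max_3; infer_instance

-- ===== CLAIM (what is proved, stated in full; the proofs are below) =====
def Claim_equal_freq_of_max_3 : Prop := ∀ (carsParked : List Int) (carQuantity : List Int), Dom_freq_of_max_3 carsParked carQuantity → Pre_freq_of_max_3 carsParked carQuantity → Spec_freq_of_max_3 carsParked carQuantity (freq_of_max_3 carsParked carQuantity)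

-- ===== LEMMAS AND PROOFS =====

-- the suffix carsParked[q-1:] under Python slice-start normalisation
def sufAt (cars : List Int) (q : Int) : List Int :=
  cars.drop (PySem.List.clampIdx cars.length (q - 1))

-- the value B appends for threshold q
def bVal (cars : List Int) (q : Int) : Int :=
  ((sufAt cars q).count ((PySem.List.max? (sufAt cars q) (fun x => x)).getD 0) : Int)

theorem alt_eq_map (cars qs : List Int) :
    freq_of_max_3_alt cars qs = (PySem.List.sorted qs (fun x => x) true).map (bVal cars) := by
  simp [freq_of_max_3_alt, bVal, sufAt, PySem.List.slice_some_none]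

theorem max_char (s : List Int) (m : Int) (hm : m ∈ s) (hle : ∀ y ∈ s, y ≤ m) :
    PySem.List.max? s (fun x => x) = some m := by
  cases h : PySem.List.max? s (fun x => x) with
  | none =>
      rw [PySem.List.max?_eq_none_iff] at h
      subst h; cases hm
  | some m' =>
      have h1 := PySem.List.max?_mem h
      have h2 := PySem.List.max?_isMax h m hm
      have : m' = m := le_antisymm (hle m' h1) h2
      rw [this]

theorem bVal_char (cars : List Int) (q m : Int) (hm : m ∈ sufAt cars q)
    (hle : ∀ y ∈ sufAt cars q, y ≤ m) :
    bVal cars q = ((sufAt cars q).count m : Int) := by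
  unfold bVal
  rw [max_char _ m hm hle]
  rfl

theorem decomp (cars : List Int) (a b : Int)
    (h : PySem.List.clampIdx cars.length (b - 1) ≤ PySem.List.clampIdx cars.length (a - 1)) :
    PySem.List.slice cars (some (b - 1)) (some (a - 1)) ++ sufAt cars a = sufAt cars b := by
  unfold sufAt
  show (cars.drop (PySem.List.clampIdx cars.length (b - 1))).take
      (PySem.List.clampIdx cars.length (a - 1) - PySem.List.clampIdx cars.length (b - 1)) ++ _ = _
  have hd : cars.drop (PySem.List.clampIdx cars.length (a - 1)) =
      (cars.drop (PySem.List.clampIdx cars.length (b - 1))).drop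
        (PySem.List.clampIdx cars.length (a - 1) - PySem.List.clampIdx cars.length (b - 1)) := by
    rw [List.drop_drop]
    congr 1
    omega
  rw [hd, List.take_append_drop]

theorem seg_ne_nil (cars : List Int) (a b : Int)
    (hlt : PySem.List.clampIdx cars.length (b - 1) < PySem.List.clampIdx cars.length (a - 1)) :
    PySem.List.slice cars (some (b - 1)) (some (a - 1)) ≠ [] := by
  have hle := PySem.List.clampIdx_le cars.length (a - 1)
  intro hnil
  have : (PySem.List.slice cars (some (b - 1)) (some (a - 1))).length = 0 := by rw [hnil]; rfl
  rw [show PySem.List.slice cars (some (b - 1)) (some (a - 1)) =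
      (cars.drop (PySem.List.clampIdx cars.length (b - 1))).take
        (PySem.List.clampIdx cars.length (a - 1) - PySem.List.clampIdx cars.length (b - 1)) from rfl] at this
  rw [List.length_take, List.length_drop] at this
  omega

theorem pyGet?_concat_neg_one (xs : List Int) (v : Int) :
    PySem.List.pyGet? (xs ++ [v]) (-1) = some v := by
  simp only [PySem.List.pyGet?, PySem.List.pyIdx?, List.length_append, List.length_cons,
    List.length_nil]
  have h0 : ¬ (0 : Int) ≤ -1 := by norm_num
  rw [if_neg h0, if_pos (by push_cast; omega)]
  simp

-- the loop invariant of A's for-loop: record_max is the max of the current suffix, dcount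
-- holds its count there, and the last appended answer is that count
theorem loopA (cars : List Int) (rest : List Int) : ∀ (a rm rc : Int)
    (d : PySem.Dict Int Int) (ans : List Int),
    rm ∈ sufAt cars a →
    (∀ y ∈ sufAt cars a, y ≤ rm) →
    d.getD rm 0 = ((sufAt cars a).count rm : Int) →
    PySem.List.pyGet? ans (-1) = some (((sufAt cars a).count rm : Int)) →
    (∀ p ∈ (a :: rest).zip rest, p.2 = p.1 ∨
        PySem.List.clampIdx cars.length (p.2 - 1) < PySem.List.clampIdx cars.length (p.1 - 1)) →
    (((a :: rest).zip rest).foldl (fomStepA cars) (d, rm, rc, ans)).2.2.2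
      = ans ++ rest.map (bVal cars) := by
  induction rest with
  | nil => intro a rm rc d ans _ _ _ _ _; simp
  | cons b r ih =>
    intro a rm rc d ans hmem hmax hcnt hlast hchain
    rw [List.zip_cons_cons, List.foldl_cons]
    have hchain' : ∀ p ∈ (b :: r).zip r, p.2 = p.1 ∨
        PySem.List.clampIdx cars.length (p.2 - 1) < PySem.List.clampIdx cars.length (p.1 - 1) := by
      intro p hp
      exact hchain p (by rw [List.zip_cons_cons]; exact List.mem_cons_of_mem _ hp)
    by_cases hba : b = a
    · -- duplicate threshold: copy the previous answer
      have hsb : sufAt cars b = sufAt cars a := by rw [hba]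
      have step : fomStepA cars (d, rm, rc, ans) (a, b)
          = (d, rm, rc, ans ++ [((sufAt cars a).count rm : Int)]) := by
        simp [fomStepA, hba, hlast]
      rw [step]
      rw [ih b rm rc d _ (hsb ▸ hmem) (hsb ▸ hmax) (hsb ▸ hcnt)
        (by rw [pyGet?_concat_neg_one, hsb]) hchain']
      rw [List.map_cons, bVal_char cars b rm (hsb ▸ hmem) (hsb ▸ hmax), hsb]
      simp
    · -- strictly smaller threshold: a nonempty new segment
      have hlt : PySem.List.clampIdx cars.length (b - 1) < PySem.List.clampIdx cars.length (a - 1) := by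
        rcases hchain (a, b) (by rw [List.zip_cons_cons]; exact List.mem_cons_self) with h | h
        · exact absurd h hba
        · exact h
      set seg := PySem.List.slice cars (some (b - 1)) (some (a - 1)) with hseg
      have hdec : seg ++ sufAt cars a = sufAt cars b := decomp cars a b (le_of_lt hlt)
      have hsegne : seg ≠ [] := seg_ne_nil cars a b hlt
      obtain ⟨c, hc⟩ : ∃ c, PySem.List.max? seg (fun x => x) = some c := by
        cases h : PySem.List.max? seg (fun x => x) with
        | none => exact absurd ((PySem.List.max?_eq_none_iff _ _).1 h) hsegne
        | some c => exact ⟨c, rfl⟩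
      have hcm : c ∈ seg := PySem.List.max?_mem hc
      have hcle : ∀ y ∈ seg, y ≤ c := fun y hy => PySem.List.max?_isMax hc y hy
      -- count of rm in the new suffix
      have hcount_app : ∀ v : Int, (sufAt cars b).count v = seg.count v + (sufAt cars a).count v := by
        intro v; rw [← hdec, List.count_append]
      rcases lt_trichotomy rm c with hgt | heq | hlt2
      · -- curr_max > record_max
        have hnotin : c ∉ sufAt cars a := fun h => absurd (hmax c h) (not_le.2 hgt)
        have hcnt_b : ((sufAt cars b).count c : Int) = (seg.count c : Int) := by
          rw [hcount_app c, List.count_eq_zero_of_not_mem hnotin]; push_cast; ring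
        have step : fomStepA cars (d, rm, rc, ans) (a, b)
            = (d.insert c (seg.count c : Int), c, (seg.count c : Int),
               ans ++ [((seg.count c : Int))]) := by
          simp [fomStepA, hba, ← hseg, hc, hgt, PySem.Dict.getD_insert_self]
        rw [step]
        have hmem' : c ∈ sufAt cars b := by rw [← hdec]; exact List.mem_append_left _ hcm
        have hmax' : ∀ y ∈ sufAt cars b, y ≤ c := by
          intro y hy; rw [← hdec] at hy
          rcases List.mem_append.1 hy with h | h
          · exact hcle y h
          · exact le_of_lt (lt_of_le_of_lt (hmax y h) hgt)
        rw [ih b c (seg.count c : Int) _ _ hmem' hmax'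
          (by rw [PySem.Dict.getD_insert_self, hcnt_b])
          (by rw [pyGet?_concat_neg_one, hcnt_b]) hchain']
        rw [List.map_cons, bVal_char cars b c hmem' hmax', hcnt_b]
        simp
      · -- curr_max == record_max
        subst heq
        have hcnt_b : ((sufAt cars b).count rm : Int) = d.getD rm 0 + (seg.count rm : Int) := by
          rw [hcount_app rm, hcnt]; push_cast; ring
        have step : fomStepA cars (d, rm, rc, ans) (a, b)
            = (d.modify rm 0 (· + (seg.count rm : Int)), rm, (seg.count rm : Int),
               ans ++ [d.getD rm 0 + (seg.count rm : Int)]) := by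
          simp [fomStepA, hba, ← hseg, hc, PySem.Dict.getD_modify_self]
        rw [step]
        have hmem' : rm ∈ sufAt cars b := by rw [← hdec]; exact List.mem_append_right _ hmem
        have hmax' : ∀ y ∈ sufAt cars b, y ≤ rm := by
          intro y hy; rw [← hdec] at hy
          rcases List.mem_append.1 hy with h | h
          · exact hcle y h
          · exact hmax y h
        rw [ih b rm (seg.count rm : Int) _ _ hmem' hmax'
          (by rw [PySem.Dict.getD_modify_self, hcnt_b])
          (by rw [pyGet?_concat_neg_one, hcnt_b]) hchain']
        rw [List.map_cons, bVal_char cars b rm hmem' hmax', hcnt_b]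
        simp
      · -- curr_max < record_max
        have hnotin : rm ∉ seg := fun h => absurd (hcle rm h) (not_le.2 hlt2)
        have hcnt_b : ((sufAt cars b).count rm : Int) = ((sufAt cars a).count rm : Int) := by
          rw [hcount_app rm, List.count_eq_zero_of_not_mem hnotin]; push_cast; ring
        have step : fomStepA cars (d, rm, rc, ans) (a, b)
            = (d, rm, rc, ans ++ [d.getD rm 0]) := by
          simp [fomStepA, hba, ← hseg, hc, not_lt.2 (le_of_lt hlt2), ne_of_lt hlt2]
        rw [step]
        have hmem' : rm ∈ sufAt cars b := by rw [← hdec]; exact List.mem_append_right _ hmem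
        have hmax' : ∀ y ∈ sufAt cars b, y ≤ rm := by
          intro y hy; rw [← hdec] at hy
          rcases List.mem_append.1 hy with h | h
          · exact le_of_lt (lt_of_le_of_lt (hcle y h) hlt2)
          · exact hmax y h
        rw [ih b rm rc _ _ hmem' hmax' (by rw [hcnt, hcnt_b])
          (by rw [pyGet?_concat_neg_one, hcnt, hcnt_b]) hchain']
        rw [List.map_cons, bVal_char cars b rm hmem' hmax', hcnt_b, hcnt]
        simp

-- ===== VERDICT (by name: the statement is the Claim_ definition above) =====
theorem freq_of_max_3_spec : Claim_equal_freq_of_max_3 := by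
  intro cars qs _hdom hpre
  unfold Spec_freq_of_max_3
  unfold Pre_freq_of_max_3 at hpre
  rw [alt_eq_map]
  unfold freq_of_max_3
  cases hs : PySem.List.sorted qs (fun x => x) true with
  | nil => rw [hs] at hpre; exact absurd rfl hpre.1
  | cons q0 rest =>
    rw [hs] at hpre
    obtain ⟨-, hhead, hchain⟩ := hpre
    have hhead0 : PySem.List.clampIdx cars.length (q0 - 1) < cars.length :=
      hhead q0 (by simp)
    simp only []
    show (have suf := PySem.List.slice cars (some (q0 - 1));
      have dcount := PySem.Dict.counter suf;
      have record_max := (PySem.List.max? dcount.keys fun x => x).getD 0;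
      have record_count := dcount.getD record_max 0;
      (List.foldl (fomStepA cars) (dcount, record_max, record_count, [record_count])
        ((q0 :: rest).zip (q0 :: rest).tail)).2.2.2) = _
    rw [PySem.List.slice_some_none]
    -- the initial suffix and its Counter
    have hsufne : sufAt cars q0 ≠ [] := by
      unfold sufAt
      intro h
      have := congrArg List.length h
      rw [List.length_drop] at this
      simp at this
      omega
    have hkeys : (PySem.Dict.counter (sufAt cars q0)).keys = PySem.Set.ofList (sufAt cars q0) :=
      PySem.Dict.keys_counter _
    obtain ⟨m, hm⟩ : ∃ m, PySem.List.max?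
        ((PySem.Dict.counter (sufAt cars q0)).keys) (fun x => x) = some m := by
      cases h : PySem.List.max? ((PySem.Dict.counter (sufAt cars q0)).keys) (fun x => x) with
      | none =>
          rw [PySem.List.max?_eq_none_iff, hkeys] at h
          obtain ⟨x, t, hx⟩ := List.exists_cons_of_ne_nil hsufne
          have : x ∈ PySem.Set.ofList (sufAt cars q0) := by
            rw [PySem.Set.mem_ofList, hx]; exact List.mem_cons_self
          rw [h] at this; cases this
      | some m => exact ⟨m, rfl⟩
    have hmmem : m ∈ sufAt cars q0 := by
      have := PySem.List.max?_mem hm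
      rw [hkeys, PySem.Set.mem_ofList] at this
      exact this
    have hmmax : ∀ y ∈ sufAt cars q0, y ≤ m := by
      intro y hy
      exact PySem.List.max?_isMax hm y (by rw [hkeys, PySem.Set.mem_ofList]; exact hy)
    have hrc : (PySem.Dict.counter (sufAt cars q0)).getD m 0 = ((sufAt cars q0).count m : Int) := by
      rw [PySem.Dict.getD_counter]
    rw [show cars.drop (PySem.List.clampIdx cars.length (q0 - 1)) = sufAt cars q0 from rfl]
    show (List.foldl (fomStepA cars)
        (PySem.Dict.counter (sufAt cars q0),
         (PySem.List.max? (PySem.Dict.counter (sufAt cars q0)).keys fun x => x).getD 0,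
         (PySem.Dict.counter (sufAt cars q0)).getD
           ((PySem.List.max? (PySem.Dict.counter (sufAt cars q0)).keys fun x => x).getD 0) 0,
         [(PySem.Dict.counter (sufAt cars q0)).getD
           ((PySem.List.max? (PySem.Dict.counter (sufAt cars q0)).keys fun x => x).getD 0) 0])
        ((q0 :: rest).zip (q0 :: rest).tail)).2.2.2 = List.map (bVal cars) (q0 :: rest)
    rw [hm]
    simp only [Option.getD_some]
    rw [hrc]
    simp only [List.tail_cons]
    rw [loopA cars rest q0 m _ _ _ hmmem hmmax hrc
      (by rw [show ([((sufAt cars q0).count m : Int)] : List Int)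
            = [] ++ [((sufAt cars q0).count m : Int)] from rfl, pyGet?_concat_neg_one])
      hchain]
    rw [List.map_cons, bVal_char cars q0 m hmmem hmmax]
    simp
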